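-- pv_equiv track=rewrite | github.com/pypi-data/pypi-mirror-380 | packages/cursus/cursus-1.3.5.tar.gz/cursus-1.3.5/src/cursus/validation/alignment/spec_dependency_alignment.py | _is_compatible_output
-- ===== SOURCE A (Python) =====
-- def _is_compatible_output(
--     required_logical_name: str, output_logical_name: str
-- ) -> bool:
--     """Check if an output logical name is compatible with a required logical name using flexible matching."""
--     if not required_logical_name or not output_logical_name:
--         return False
--
--     # Exact match
--     if required_logical_name == output_logical_name:
--         return True
--
--     # Common data input/output patterns
--     data_patterns = {
--         "data_input": [
--             "processed_data",
--             "training_data",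
--             "input_data",
--             "data",
--             "model_input_data",
--         ],
--         "input_data": [
--             "processed_data",
--             "training_data",
--             "data_input",
--             "data",
--             "model_input_data",
--         ],
--         "training_data": [
--             "processed_data",
--             "data_input",
--             "input_data",
--             "data",
--             "model_input_data",
--         ],
--         "processed_data": [
--             "data_input",
--             "input_data",
--             "training_data",
--             "data",
--             "model_input_data",
--         ],
--         "model_input_data": [
--             "processed_data",
--             "data_input",
--             "input_data",
--             "training_data",
--             "data",
--         ],
--         "data": [
--             "processed_data",
--             "data_input",
--             "input_data",
--             "training_data",
--             "model_input_data",
--         ],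
--     }
--
--     # Check if required name has compatible patterns
--     compatible_outputs = data_patterns.get(required_logical_name.lower(), [])
--     if output_logical_name.lower() in compatible_outputs:
--         return True
--
--     # Check reverse mapping
--     for pattern_key, pattern_values in data_patterns.items():
--         if (
--             output_logical_name.lower() == pattern_key
--             and required_logical_name.lower() in pattern_values
--         ):
--             return True
--
--     return False
-- ===== SOURCE B (Python) =====
-- _GROUP = frozenset({
--     "data_input", "input_data", "training_data",
--     "processed_data", "model_input_data", "data",
-- })
--
--
-- def _is_compatible_output(required_logical_name: str, output_logical_name: str) -> bool:
--     if not required_logical_name or not output_logical_name: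
--         return False
--     if required_logical_name == output_logical_name:
--         return True
--     rl = required_logical_name.lower()
--     ol = output_logical_name.lower()
--     return rl != ol and rl in _GROUP and ol in _GROUP
-- ===== Notes on version B (the rewrite author's own statement) =====
-- stated objective: simpler
-- what changed: The 6-key adjacency dict (forward lookup plus a reverse-mapping loop over all items) is replaced by one flat set of the 6 names and a single symmetric membership test rl != ol and rl in GROUP and ol in GROUP.
import Mathlib
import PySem

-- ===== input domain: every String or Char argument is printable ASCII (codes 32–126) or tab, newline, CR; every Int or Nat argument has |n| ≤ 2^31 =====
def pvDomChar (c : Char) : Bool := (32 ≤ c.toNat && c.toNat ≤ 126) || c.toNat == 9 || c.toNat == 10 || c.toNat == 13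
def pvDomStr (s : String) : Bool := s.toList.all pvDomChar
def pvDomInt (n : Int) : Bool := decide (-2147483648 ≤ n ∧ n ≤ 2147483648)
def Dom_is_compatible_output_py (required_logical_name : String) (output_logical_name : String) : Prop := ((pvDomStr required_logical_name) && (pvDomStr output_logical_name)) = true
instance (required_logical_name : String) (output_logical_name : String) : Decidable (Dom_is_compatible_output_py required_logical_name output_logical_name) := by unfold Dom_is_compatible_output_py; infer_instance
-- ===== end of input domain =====

-- B replaces A's 6-key adjacency dict (forward lookup + reverse-mapping loop) by one flat
-- 6-name set with a single symmetric membership test; return values agree on all inputs.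

-- ===== PORT A =====
-- the data_patterns dict literal, as an association list in insertion order
def dataPatterns : PySem.Dict String (List String) := PySem.Dict.mk
  [("data_input", ["processed_data", "training_data", "input_data", "data", "model_input_data"]),
   ("input_data", ["processed_data", "training_data", "data_input", "data", "model_input_data"]),
   ("training_data", ["processed_data", "data_input", "input_data", "data", "model_input_data"]),
   ("processed_data", ["data_input", "input_data", "training_data", "data", "model_input_data"]),
   ("model_input_data", ["processed_data", "data_input", "input_data", "training_data", "data"]),
   ("data", ["processed_data", "data_input", "input_data", "training_data", "model_input_data"])]

-- the 'for pattern_key, pattern_values in data_patterns.items(): if … return True' loop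
def revLoop (rl ol : String) : List (String × List String) → Bool
  | [] => false
  | (k, vs) :: rest => if ol == k && vs.contains rl then true else revLoop rl ol rest

def is_compatible_output_py (required_logical_name : String) (output_logical_name : String) : Bool :=
  if required_logical_name == "" || output_logical_name == "" then false
  else if required_logical_name == output_logical_name then true
  else
    let compatible_outputs := PySem.Dict.getD dataPatterns (PySem.Str.lower required_logical_name) []
    if compatible_outputs.contains (PySem.Str.lower output_logical_name) then true
    else revLoop (PySem.Str.lower required_logical_name) (PySem.Str.lower output_logical_name) dataPatterns.items

-- ===== PORT B =====
def pyGroup : List String :=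
  ["data_input", "input_data", "training_data", "processed_data", "model_input_data", "data"]

def is_compatible_output_py_alt (required_logical_name : String) (output_logical_name : String) : Bool :=
  if required_logical_name == "" || output_logical_name == "" then false
  else if required_logical_name == output_logical_name then true
  else
    let rl := PySem.Str.lower required_logical_name
    let ol := PySem.Str.lower output_logical_name
    (rl != ol) && (pyGroup.contains rl && pyGroup.contains ol)

-- ===== PRECONDITION & SPEC =====
def Spec_is_compatible_output_py (required_logical_name : String) (output_logical_name : String) (out : Bool) : Prop := out = is_compatible_output_py_alt required_logical_name output_logical_name
instance (required_logical_name : String) (output_logical_name : String) (out : Bool) : Decidable (Spec_is_compatible_output_py required_logical_name output_logical_name out) := by unfold Spec_is_compatible_output_py; infer_instance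

-- ===== CLAIM (what is proved, stated in full; the proofs are below) =====
def Claim_equal_is_compatible_output_py : Prop := ∀ (required_logical_name : String) (output_logical_name : String), Dom_is_compatible_output_py required_logical_name output_logical_name → Spec_is_compatible_output_py required_logical_name output_logical_name (is_compatible_output_py required_logical_name output_logical_name)

-- ===== LEMMAS AND PROOFS =====

-- core fact about the lowered names: A's forward lookup + reverse loop equals B's symmetric test
theorem core_eq (rl ol : String) :
    (if (PySem.Dict.getD dataPatterns rl []).contains ol then true
     else revLoop rl ol dataPatterns.items)
      = ((rl != ol) && (pyGroup.contains rl && pyGroup.contains ol)) := by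
  by_cases hr : rl ∈ pyGroup
  · have hr' : rl = "data_input" ∨ rl = "input_data" ∨ rl = "training_data" ∨
        rl = "processed_data" ∨ rl = "model_input_data" ∨ rl = "data" := by
      simpa [pyGroup] using hr
    rcases hr' with rfl | rfl | rfl | rfl | rfl | rfl <;>
    · by_cases ho : ol ∈ pyGroup
      · have ho' : ol = "data_input" ∨ ol = "input_data" ∨ ol = "training_data" ∨
            ol = "processed_data" ∨ ol = "model_input_data" ∨ ol = "data" := by
          simpa [pyGroup] using ho
        rcases ho' with rfl | rfl | rfl | rfl | rfl | rfl <;> decide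
      · simp only [pyGroup, List.mem_cons, List.not_mem_nil, or_false, not_or] at ho
        obtain ⟨h1, h2, h3, h4, h5, h6⟩ := ho
        simp [dataPatterns, revLoop, pyGroup, PySem.Dict.getD, PySem.Dict.get?,
          h1, h2, h3, h4, h5, h6]
  · simp only [pyGroup, List.mem_cons, List.not_mem_nil, or_false, not_or] at hr
    obtain ⟨h1, h2, h3, h4, h5, h6⟩ := hr
    have e1 : ("data_input" == rl) = false := by simp [Ne.symm h1]
    have e2 : ("input_data" == rl) = false := by simp [Ne.symm h2]
    have e3 : ("training_data" == rl) = false := by simp [Ne.symm h3]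
    have e4 : ("processed_data" == rl) = false := by simp [Ne.symm h4]
    have e5 : ("model_input_data" == rl) = false := by simp [Ne.symm h5]
    have e6 : ("data" == rl) = false := by simp [Ne.symm h6]
    simp [dataPatterns, revLoop, pyGroup, PySem.Dict.getD, PySem.Dict.get?, List.find?,
      h1, h2, h3, h4, h5, h6, e1, e2, e3, e4, e5, e6]

-- ===== VERDICT (by name: the statement is the Claim_ definition above) =====
theorem is_compatible_output_py_spec : Claim_equal_is_compatible_output_py := by
  intro r o _
  unfold Spec_is_compatible_output_py is_compatible_output_py is_compatible_output_py_alt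
  split_ifs with h1 h2
  · rfl
  · rfl
  · exact core_eq _ _
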